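-- pv_equiv track=rewrite | github.com/AnkitGole007/researchagent | app.py | extract_venue
-- ===== SOURCE A (Python) =====
-- from typing import List, Optional, Dict, Any
--
-- CONFERENCE_KEYWORDS = [
--     "EMNLP", "ACL", "NAACL", "EACL",
--     "NeurIPS", "ICLR", "ICML",
--     "CVPR", "ECCV",
--     "ICASSP", "AAAI", "AISTATS",
-- ]
--
-- JOURNAL_KEYWORDS = [
--     "Nature", "Science",
--     "JMLR", "Journal of Machine Learning Research",
--     "TPAMI", "IEEE Transactions on Pattern Analysis",
--     "Artificial Intelligence Journal",
--     "IJCV", "International Journal of Computer Vision",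
--     "Nature Machine Intelligence", "Nature Communications",
-- ]
--
-- NEGATIVE_VENUE_SIGNALS = ["submitted to", "under review", "preprint"]
--
-- def extract_venue(comment: str) -> Optional[str]:
--     if not comment:
--         return None
--     c = comment.lower()
--     if any(sig in c for sig in NEGATIVE_VENUE_SIGNALS):
--         return None
--     all_venues = sorted(CONFERENCE_KEYWORDS + JOURNAL_KEYWORDS)
--     for venue in all_venues:
--         if venue.lower() in c:
--             return venue
--     return None
-- ===== SOURCE B (Python) =====
-- from typing import List, Optional, Dict, Any
--
-- CONFERENCE_KEYWORDS = [
--     "EMNLP", "ACL", "NAACL", "EACL",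
--     "NeurIPS", "ICLR", "ICML",
--     "CVPR", "ECCV",
--     "ICASSP", "AAAI", "AISTATS",
-- ]
--
-- JOURNAL_KEYWORDS = [
--     "Nature", "Science",
--     "JMLR", "Journal of Machine Learning Research",
--     "TPAMI", "IEEE Transactions on Pattern Analysis",
--     "Artificial Intelligence Journal",
--     "IJCV", "International Journal of Computer Vision",
--     "Nature Machine Intelligence", "Nature Communications",
-- ]
--
-- NEGATIVE_VENUE_SIGNALS = ["submitted to", "under review", "preprint"]
--
-- def _pick(best, v):
--     if best is None or v < best:
--         return v
--     return best
--
-- def extract_venue(comment: str) -> Optional[str]: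
--     if not comment:
--         return None
--     c = comment.lower()
--     if any(sig in c for sig in NEGATIVE_VENUE_SIGNALS):
--         return None
--     best = None
--     for v in CONFERENCE_KEYWORDS + JOURNAL_KEYWORDS:
--         if v.lower() in c:
--             best = _pick(best, v)
--     return best
-- ===== Notes on version B (the rewrite author's own statement) =====
-- stated objective: alternative
-- what changed: Instead of sorting the 23-keyword union and returning the first keyword whose lowercase form occurs in the comment, B makes a single pass over the unsorted union keeping the alphabetically smallest matching keyword; no sort is performed.
import Mathlib
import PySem

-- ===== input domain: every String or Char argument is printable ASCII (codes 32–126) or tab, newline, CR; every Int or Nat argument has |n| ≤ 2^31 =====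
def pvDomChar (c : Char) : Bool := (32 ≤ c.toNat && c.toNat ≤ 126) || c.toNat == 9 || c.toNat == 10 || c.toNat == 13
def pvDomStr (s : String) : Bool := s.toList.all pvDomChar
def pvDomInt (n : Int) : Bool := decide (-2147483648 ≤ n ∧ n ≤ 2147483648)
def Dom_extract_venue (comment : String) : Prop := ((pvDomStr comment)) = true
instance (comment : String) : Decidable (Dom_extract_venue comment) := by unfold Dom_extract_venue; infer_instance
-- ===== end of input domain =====

-- B replaces A's sort-then-first-hit scan with a single pass over the unsorted keyword
-- list that keeps the alphabetically smallest matching keyword (objective: alternative).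

def CONFERENCE_KEYWORDS : List String :=
  ["EMNLP", "ACL", "NAACL", "EACL",
   "NeurIPS", "ICLR", "ICML",
   "CVPR", "ECCV",
   "ICASSP", "AAAI", "AISTATS"]

def JOURNAL_KEYWORDS : List String :=
  ["Nature", "Science",
   "JMLR", "Journal of Machine Learning Research",
   "TPAMI", "IEEE Transactions on Pattern Analysis",
   "Artificial Intelligence Journal",
   "IJCV", "International Journal of Computer Vision",
   "Nature Machine Intelligence", "Nature Communications"]

def NEGATIVE_VENUE_SIGNALS : List String := ["submitted to", "under review", "preprint"]

-- ===== PORT A =====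
def extract_venue (comment : String) : Option String :=
  if comment = "" then none
  else
    let c := PySem.Str.lower comment
    if NEGATIVE_VENUE_SIGNALS.any (fun sig => PySem.Str.isIn sig c) then none
    else
      let all_venues := PySem.List.sorted (CONFERENCE_KEYWORDS ++ JOURNAL_KEYWORDS) (fun x => x) false
      all_venues.find? (fun venue => PySem.Str.isIn (PySem.Str.lower venue) c)

-- ===== PORT B =====
-- helper _pick of Source B: the smaller of the candidate and the best so far
def pvPick (best : Option String) (v : String) : Option String :=
  match best with
  | none => some v
  | some b => if v < b then some v else some b

def extract_venue_alt (comment : String) : Option String :=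
  if comment = "" then none
  else
    let c := PySem.Str.lower comment
    if NEGATIVE_VENUE_SIGNALS.any (fun sig => PySem.Str.isIn sig c) then none
    else
      (CONFERENCE_KEYWORDS ++ JOURNAL_KEYWORDS).foldl
        (fun best v => if PySem.Str.isIn (PySem.Str.lower v) c then pvPick best v else best)
        none

-- ===== PRECONDITION & SPEC =====
def Spec_extract_venue (comment : String) (out : Option String) : Prop := out = extract_venue_alt comment
instance (comment : String) (out : Option String) : Decidable (Spec_extract_venue comment out) := by unfold Spec_extract_venue; infer_instance

-- ===== CLAIM (what is proved, stated in full; the proofs are below) =====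
def Claim_equal_extract_venue : Prop := ∀ (comment : String), Dom_extract_venue comment → Spec_extract_venue comment (extract_venue comment)

-- ===== LEMMAS AND PROOFS =====

-- folding a guarded step is folding the step over the filtered list
theorem pv_foldl_if_filter {α β : Type} (p : α → Bool) (g : β → α → β) :
    ∀ (L : List α) (a : β),
      L.foldl (fun b v => if p v then g b v else b) a = (L.filter p).foldl g a := by
  intro L
  induction L with
  | nil => intro a; rfl
  | cons x t ih =>
    intro a
    by_cases h : p x = true <;> simp [List.filter, h, ih]

-- once seeded, folding pvPick is the running min
theorem pv_foldl_pick_some :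
    ∀ (t : List String) (a : String), t.foldl pvPick (some a) = some (t.foldl min a) := by
  intro t
  induction t with
  | nil => intro a; rfl
  | cons x t ih =>
    intro a
    have hs : pvPick (some a) x = some (min a x) := by
      unfold pvPick
      by_cases h : x < a
      · simp [h, min_eq_right (le_of_lt h)]
      · simp [h, min_eq_left (le_of_not_gt h)]
    simp only [List.foldl]
    rw [hs, ih]

-- folding min over elements all ≥ a stays at a
theorem pv_foldl_min_ge {α : Type} [LinearOrder α] :
    ∀ (t : List α) (a : α), (∀ y ∈ t, a ≤ y) → t.foldl min a = a := by
  intro t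
  induction t with
  | nil => intro a _; rfl
  | cons x t ih =>
    intro a h
    simp only [List.foldl]
    rw [min_eq_left (h x (by simp)), ih a (fun y hy => h y (by simp [hy]))]

-- on a strictly sorted list, the first hit is the min of the hits
theorem pv_find?_pairwise {α : Type} [LinearOrder α] (p : α → Bool) :
    ∀ (S : List α), S.Pairwise (· < ·) → S.find? p = (S.filter p).min? := by
  intro S
  induction S with
  | nil => intro _; rfl
  | cons a t ih =>
    intro hpw
    rcases List.pairwise_cons.mp hpw with ⟨ha, htl⟩
    cases h : p a
    · rw [List.find?_cons_of_neg (by simp [h]), List.filter_cons_of_neg (by simp [h])]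
      exact ih htl
    · rw [List.find?_cons_of_pos h, List.filter_cons_of_pos h]
      show some a = some ((List.filter p t).foldl min a)
      rw [pv_foldl_min_ge _ _ (fun y hy => le_of_lt (ha y (List.mem_of_mem_filter hy)))]

-- min? is a value invariant under permutation, for a linear order
theorem pv_min?_perm {α : Type} [LinearOrder α] {l₁ l₂ : List α} (h : l₁.Perm l₂) :
    l₁.min? = l₂.min? := by
  cases hm : l₁.min? with
  | none =>
    rw [List.min?_eq_none_iff] at hm
    subst hm
    rw [← h.nil_eq]
    rfl
  | some m =>
    rcases List.min?_eq_some_iff.mp hm with ⟨hmem, hle⟩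
    symm
    exact List.min?_eq_some_iff.mpr ⟨h.mem_iff.mp hmem, fun b hb => hle b (h.mem_iff.mpr hb)⟩

-- the core equivalence: first hit in the sorted nodup list = running min over the raw list
theorem pv_core (U : List String) (hnd : U.Nodup) (p : String → Bool) :
    (PySem.List.sorted U (fun x => x) false).find? p
      = U.foldl (fun best v => if p v then pvPick best v else best) none := by
  have hperm : (PySem.List.sorted U (fun x => x) false).Perm U := PySem.List.sorted_perm U _ false
  have hndS : (PySem.List.sorted U (fun x => x) false).Nodup := hperm.nodup_iff.mpr hnd
  have hle : (PySem.List.sorted U (fun x => x) false).Pairwise (fun a b => a ≤ b) :=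
    PySem.List.sorted_pairwise U (fun x => x)
  have hlt : (PySem.List.sorted U (fun x => x) false).Pairwise (· < ·) :=
    (hle.and hndS).imp (fun h => lt_of_le_of_ne h.1 h.2)
  rw [pv_find?_pairwise p _ hlt, pv_min?_perm (hperm.filter p),
      pv_foldl_if_filter p pvPick U none]
  cases hft : U.filter p with
  | nil => rfl
  | cons a t =>
    show (a :: t).min? = List.foldl pvPick (pvPick none a) t
    rw [show pvPick none a = some a from rfl, pv_foldl_pick_some t a]
    rfl

-- ===== VERDICT (by name: the statement is the Claim_ definition above) =====
theorem extract_venue_spec : Claim_equal_extract_venue := by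
  intro comment _
  unfold Spec_extract_venue extract_venue extract_venue_alt
  by_cases h0 : comment = ""
  · simp [h0]
  · simp only [h0, if_false]
    by_cases h1 : NEGATIVE_VENUE_SIGNALS.any
        (fun sig => PySem.Str.isIn sig (PySem.Str.lower comment)) = true
    · rw [if_pos h1, if_pos h1]
    · rw [if_neg h1, if_neg h1]
      exact pv_core _ (by decide) _
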